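-- pv_equiv track=rewrite | github.com/mrtozner/omnimemory | mcp_server/context_merger.py | _merge_searches
-- ===== SOURCE A (Python) =====
-- from typing import Dict, List, Any, Optional
--
-- def _merge_searches(
--     existing: List[Dict[str, Any]],
--     incoming: List[Dict[str, Any]],
--     max_items: int = 20,
-- ) -> List[Dict[str, Any]]:
--     """Merge search histories without duplicates.
--
--     Removes duplicate searches but preserves recency.
--
--     Args:
--         existing: Existing search records
--         incoming: New search records
--         max_items: Maximum number of searches to keep
--
--     Returns:
--         Merged search list (deduplicated, most recent first)
--     """
--     seen = set()
--     merged = []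
--
--     # Process in reverse chronological order
--     for search in sorted(
--         existing + incoming, key=lambda x: x.get("timestamp", ""), reverse=True
--     ):
--         query = search.get("query", "")
--         if not query:
--             continue
--
--         if query not in seen:
--             seen.add(query)
--             merged.append(search)
--
--             if len(merged) >= max_items:
--                 break
--
--     return merged
-- ===== SOURCE B (Python) =====
-- from typing import Dict, List, Any
--
--
-- def _merge_searches(
--     existing: List[Dict[str, Any]],
--     incoming: List[Dict[str, Any]],
--     max_items: int = 20,
-- ) -> List[Dict[str, Any]]:
--     """Merge search histories without duplicates (most recent first).
--
--     Builds a query -> (index, record) table in one pass, keeping per query the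
--     record with the strictly greatest timestamp (earliest index on ties), then
--     ranks the kept records by timestamp descending / original index ascending
--     and returns the first max_items of them.
--     """
--     best = {}
--     for idx, rec in enumerate(existing + incoming):
--         query = rec.get("query", "")
--         if not query:
--             continue
--         prev = best.get(query)
--         if prev is None or prev[1].get("timestamp", "") < rec.get("timestamp", ""):
--             best[query] = (idx, rec)
--     ranked = sorted(
--         best.values(), key=lambda p: (p[1].get("timestamp", ""), -p[0]), reverse=True
--     )
--     return [rec for _, rec in ranked][:max_items]
-- ===== Notes on version B (the rewrite author's own statement) =====
-- stated objective: alternative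
-- what changed: A sorts all records then dedups with a seen-set scan and an early break; B builds a query->(index,record) dict in one pass (keeping the strictly-latest timestamp, earliest index on ties), sorts only the kept records by (timestamp desc, index asc) and truncates to max_items.
-- intended difference: When max_items <= 0 and some record has a nonempty query, A still returns one record because its break is only checked after the first append, while B returns the plain slice kept[:max_items] (empty for max_items = 0); returning at most max_items records is the intended meaning of the limit. — e.g. on _merge_searches([[("query", "a")]], [], 0): A returns [[("query", "a")]], B returns []
import Mathlib
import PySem

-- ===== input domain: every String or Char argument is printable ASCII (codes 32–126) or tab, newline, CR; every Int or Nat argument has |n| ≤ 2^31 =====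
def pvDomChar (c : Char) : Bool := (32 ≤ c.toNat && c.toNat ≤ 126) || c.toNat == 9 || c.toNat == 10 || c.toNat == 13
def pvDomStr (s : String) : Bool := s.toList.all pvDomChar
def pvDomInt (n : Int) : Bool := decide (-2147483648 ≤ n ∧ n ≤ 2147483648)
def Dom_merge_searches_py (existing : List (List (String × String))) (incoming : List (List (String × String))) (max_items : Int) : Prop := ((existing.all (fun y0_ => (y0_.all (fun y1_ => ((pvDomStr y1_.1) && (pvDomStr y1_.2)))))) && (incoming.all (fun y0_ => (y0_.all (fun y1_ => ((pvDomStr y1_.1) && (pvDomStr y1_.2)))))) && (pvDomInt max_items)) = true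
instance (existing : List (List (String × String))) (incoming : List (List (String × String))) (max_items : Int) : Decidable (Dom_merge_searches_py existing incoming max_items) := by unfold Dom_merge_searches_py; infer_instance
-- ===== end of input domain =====

-- B replaces A's sort-everything-then-dedup-scan by a one-pass query→(index,record) table
-- followed by a sort of only the kept records, truncated to max_items; on max_items ≤ 0 with a
-- nonempty query present the two differ (see D_ below), elsewhere they agree.

-- shared accessors: r.get("timestamp", "") and r.get("query", "") on a record (assoc list)
def pvTs (r : List (String × String)) : String := PySem.Dict.getD (PySem.Dict.mk r) "timestamp" ""
def pvQy (r : List (String × String)) : String := PySem.Dict.getD (PySem.Dict.mk r) "query" ""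

-- ===== PORT A =====
-- the 'for search in sorted(...)' loop with its early break, as structural recursion
def pvLoopA (max_items : Int) : List (List (String × String)) → PySem.Set String → List (List (String × String)) → List (List (String × String))
  | [], _, merged => merged
  | s :: rest, seen, merged =>
    let query := pvQy s
    if query = "" then pvLoopA max_items rest seen merged
    else if PySem.Set.contains seen query then pvLoopA max_items rest seen merged
    else
      let merged' := merged ++ [s]
      if max_items ≤ (merged'.length : Int) then merged'
      else pvLoopA max_items rest (PySem.Set.add seen query) merged'

def merge_searches_py (existing : List (List (String × String))) (incoming : List (List (String × String))) (max_items : Int) : List (List (String × String)) :=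
  pvLoopA max_items (PySem.List.sorted (existing ++ incoming) (fun x => pvTs x) true) PySem.Set.empty []

-- ===== PORT B =====
-- one step of B's dict-building loop: best[query] = (idx, rec) on a strictly greater timestamp
def pvBestB (d : PySem.Dict String (Int × List (String × String))) (p : Int × List (String × String)) : PySem.Dict String (Int × List (String × String)) :=
  let query := pvQy p.2
  if query = "" then d
  else
    match PySem.Dict.get? d query with
    | none => PySem.Dict.insert d query p
    | some prev => if pvTs prev.2 < pvTs p.2 then PySem.Dict.insert d query p else d

def merge_searches_py_alt (existing : List (List (String × String))) (incoming : List (List (String × String))) (max_items : Int) : List (List (String × String)) :=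
  let best := (PySem.List.enumerate (existing ++ incoming) 0).foldl pvBestB PySem.Dict.empty
  let ranked := PySem.List.sorted2 (PySem.Dict.values best) (fun p => pvTs p.2) (fun p => -p.1) true
  PySem.List.slice (ranked.map (fun p => p.2)) none (some max_items)

-- ===== PRECONDITION & SPEC =====
-- When max_items ≤ 0 and some record has a nonempty query, A still returns one record (its break
-- is only checked after the first append) while B returns the slice kept[:max_items] (empty for
-- max_items = 0); returning at most max_items records is the intended meaning of the limit.
def D_merge_searches_py (existing : List (List (String × String))) (incoming : List (List (String × String))) (max_items : Int) : Prop :=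
  max_items ≤ 0 ∧ ∃ r ∈ existing ++ incoming, pvQy r ≠ ""
instance (existing : List (List (String × String))) (incoming : List (List (String × String))) (max_items : Int) : Decidable (D_merge_searches_py existing incoming max_items) := by unfold D_merge_searches_py; infer_instance

def Spec_merge_searches_py (existing : List (List (String × String))) (incoming : List (List (String × String))) (max_items : Int) (out : List (List (String × String))) : Prop := ¬ D_merge_searches_py existing incoming max_items → out = merge_searches_py_alt existing incoming max_items
instance (existing : List (List (String × String))) (incoming : List (List (String × String))) (max_items : Int) (out : List (List (String × String))) : Decidable (Spec_merge_searches_py existing incoming max_items out) := by unfold Spec_merge_searches_py; infer_instance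

def pvDiffWitness_merge_searches_py : (List (List (String × String))) × (List (List (String × String))) × Int :=
  ([[("query", "a")]], [], 0)
def pvDiffWitnessOut_merge_searches_py : (List (List (String × String))) × (List (List (String × String))) :=
  ([[("query", "a")]], [])

-- ===== CLAIM (what is proved, stated in full; the proofs are below) =====
def Claim_unchanged_merge_searches_py : Prop := ∀ (existing : List (List (String × String))) (incoming : List (List (String × String))) (max_items : Int), Dom_merge_searches_py existing incoming max_items → Spec_merge_searches_py existing incoming max_items (merge_searches_py existing incoming max_items)
def Claim_changed_merge_searches_py : Prop := Dom_merge_searches_py (pvDiffWitness_merge_searches_py.1) (pvDiffWitness_merge_searches_py.2.1) (pvDiffWitness_merge_searches_py.2.2) ∧ D_merge_searches_py (pvDiffWitness_merge_searches_py.1) (pvDiffWitness_merge_searches_py.2.1) (pvDiffWitness_merge_searches_py.2.2) ∧ merge_searches_py (pvDiffWitness_merge_searches_py.1) (pvDiffWitness_merge_searches_py.2.1) (pvDiffWitness_merge_searches_py.2.2) = pvDiffWitnessOut_merge_searches_py.1 ∧ merge_searches_py_alt (pvDiffWitness_merge_searches_py.1) (pvDiffWitness_merge_searches_py.2.1) (pvDiffWitness_merge_searches_py.2.2)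 = pvDiffWitnessOut_merge_searches_py.2 ∧ pvDiffWitnessOut_merge_searches_py.1 ≠ pvDiffWitnessOut_merge_searches_py.2

-- ===== LEMMAS AND PROOFS =====

-- the total strict rank A's stable reverse sort realises on enumerated records:
-- timestamp descending, original index ascending (as a lexicographic key)
def pvKK (p : Int × List (String × String)) : Lex (String × Int) := toLex (pvTs p.2, -p.1)

-- first-wins dedup scan (A's loop without the break), on records and on enumerated pairs
def pvDDR : List (List (String × String)) → PySem.Set String → List (List (String × String))
  | [], _ => []
  | r :: rest, seen =>
    if pvQy r = "" then pvDDR rest seen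
    else if PySem.Set.contains seen (pvQy r) then pvDDR rest seen
    else r :: pvDDR rest (PySem.Set.add seen (pvQy r))

def pvDD : List (Int × List (String × String)) → PySem.Set String → List (Int × List (String × String))
  | [], _ => []
  | p :: rest, seen =>
    if pvQy p.2 = "" then pvDD rest seen
    else if PySem.Set.contains seen (pvQy p.2) then pvDD rest seen
    else p :: pvDD rest (PySem.Set.add seen (pvQy p.2))

-- the per-query view of B's dict update
def pvStep (k : String) (o : Option (Int × List (String × String))) (p : Int × List (String × String)) : Option (Int × List (String × String)) :=
  if pvQy p.2 = k then
    match o with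
    | none => some p
    | some v => if pvTs v.2 < pvTs p.2 then some p else some v
  else o

-- 'p is the record kept for its query': pvKK-maximal among same-query elements of E
def pvWin (E : List (Int × List (String × String))) (p : Int × List (String × String)) : Prop :=
  p ∈ E ∧ pvQy p.2 ≠ "" ∧ ∀ y ∈ E, pvQy y.2 = pvQy p.2 → pvKK y ≤ pvKK p

lemma pv_kk_lt_iff (a b : Int × List (String × String)) :
    pvKK a < pvKK b ↔ (pvTs a.2 < pvTs b.2 ∨ (pvTs a.2 = pvTs b.2 ∧ -a.1 < -b.1)) := by
  simp [pvKK, Prod.Lex.lt_iff]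

lemma pv_before_eq (a b : Int × List (String × String)) :
    (decide (pvTs a.2 < pvTs b.2) || (!decide (pvTs b.2 < pvTs a.2) && decide (-a.1 < -b.1)))
      = decide (pvKK a < pvKK b) := by
  rcases lt_trichotomy (pvTs a.2) (pvTs b.2) with h | h | h
  · simp [pv_kk_lt_iff, h]
  · simp [pv_kk_lt_iff, h]
  · simp [pv_kk_lt_iff, h, not_lt.mpr (le_of_lt h), ne_of_gt h]

lemma pv_sorted2_eq (xs : List (Int × List (String × String))) :
    PySem.List.sorted2 xs (fun p => pvTs p.2) (fun p => -p.1) true = PySem.List.sorted xs pvKK true := by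
  rw [PySem.List.sorted_rev_eq_foldl_insertBy]
  have hb : (fun (a b : Int × List (String × String)) =>
      decide (pvTs b.2 < pvTs a.2) || (!decide (pvTs a.2 < pvTs b.2) && decide (-b.1 < -a.1)))
      = (fun a b => decide (pvKK b < pvKK a)) := by
    funext a b; exact pv_before_eq b a
  simp only [PySem.List.sorted2]
  rw [hb]
  simp

lemma pv_map_snd_insertBy (i : Int) (r : List (String × String)) (acc : List (Int × List (String × String)))
    (h : ∀ p ∈ acc, p.1 < i) :
    (PySem.List.insertBy (fun a b => decide (pvKK b < pvKK a)) (i, r) acc).map (·.2)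
      = PySem.List.insertBy (fun a b => decide (pvTs b < pvTs a)) r (acc.map (·.2)) := by
  induction acc with
  | nil => simp [PySem.List.insertBy]
  | cons y ys ih =>
    have hy : y.1 < i := h y (by simp)
    have hkey : decide (pvKK y < pvKK (i, r)) = decide (pvTs y.2 < pvTs r) := by
      have : pvKK y < pvKK (i, r) ↔ pvTs y.2 < pvTs r := by
        rw [pv_kk_lt_iff]
        constructor
        · rintro (h1 | ⟨h1, h2⟩)
          · exact h1
          · omega
        · exact fun h1 => Or.inl h1
      simp [this]
    have lhs : PySem.List.insertBy (fun a b => decide (pvKK b < pvKK a)) (i, r) (y :: ys)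
        = if decide (pvKK y < pvKK (i, r)) then (i, r) :: y :: ys
          else y :: PySem.List.insertBy (fun a b => decide (pvKK b < pvKK a)) (i, r) ys := rfl
    have rhs : PySem.List.insertBy (fun a b => decide (pvTs b < pvTs a)) r (y.2 :: List.map (fun x => x.2) ys)
        = if decide (pvTs y.2 < pvTs r) then r :: y.2 :: List.map (fun x => x.2) ys
          else y.2 :: PySem.List.insertBy (fun a b => decide (pvTs b < pvTs a)) r (List.map (fun x => x.2) ys) := rfl
    rw [List.map_cons, lhs, rhs]
    simp only [hkey]
    split
    · simp
    · simp only [List.map_cons]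
      rw [ih (fun p hp => h p (by simp [hp]))]

lemma pv_stab_fold (L : List (List (String × String))) (s : Int) (acc : List (Int × List (String × String)))
    (h : ∀ p ∈ acc, p.1 < s) :
    ((PySem.List.enumerate L s).foldl (fun a x => PySem.List.insertBy (fun a b => decide (pvKK b < pvKK a)) x a) acc).map (·.2)
      = L.foldl (fun a x => PySem.List.insertBy (fun a b => decide (pvTs b < pvTs a)) x a) (acc.map (·.2)) := by
  induction L generalizing s acc with
  | nil => simp [PySem.List.enumerate]
  | cons x xs ih =>
    rw [PySem.List.enumerate_cons]
    simp only [List.foldl_cons]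
    rw [ih (s + 1) _ ?_, pv_map_snd_insertBy s x acc h]
    intro p hp
    rcases (PySem.List.mem_insertBy _ _ _ _).1 hp with h1 | h1
    · subst h1; omega
    · have := h p h1; omega

lemma pv_stability (L : List (List (String × String))) :
    (PySem.List.sorted (PySem.List.enumerate L 0) pvKK true).map (·.2)
      = PySem.List.sorted L (fun x => pvTs x) true := by
  rw [PySem.List.sorted_rev_eq_foldl_insertBy, PySem.List.sorted_rev_eq_foldl_insertBy]
  simpa using pv_stab_fold L 0 [] (by simp)

lemma pv_kk_inj {a b : Int × List (String × String)} (h : pvKK a = pvKK b) : a.1 = b.1 := by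
  have := congrArg (fun x => (ofLex x).2) h
  simp [pvKK] at this
  omega

lemma pv_enum_inj (L : List (List (String × String))) :
    ∀ a ∈ PySem.List.enumerate L 0, ∀ b ∈ PySem.List.enumerate L 0, a.1 = b.1 → a = b := by
  have hn : ((PySem.List.enumerate L 0).map (fun x => x.1)).Nodup := by
    rw [PySem.List.map_fst_enumerate]
    exact (PySem.List.pairwise_lt_pyRange_one _ _).imp (fun h => ne_of_lt h)
  exact fun a ha b hb hab => List.inj_on_of_nodup_map hn ha hb hab

lemma pv_enum_pairwise (L : List (List (String × String))) :
    (PySem.List.enumerate L 0).Pairwise (fun a b => a.1 < b.1) := by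
  have hn := PySem.List.pairwise_lt_pyRange_one (0 : Int) (0 + (L.length : Int))
  rw [← PySem.List.map_fst_enumerate] at hn
  exact List.pairwise_map.mp hn

lemma pv_S_pairwise (L : List (List (String × String))) :
    (PySem.List.sorted (PySem.List.enumerate L 0) pvKK true).Pairwise (fun a b => pvKK b < pvKK a) := by
  have hle := PySem.List.sorted_pairwise_rev (PySem.List.enumerate L 0) pvKK
  have hperm := PySem.List.sorted_perm (PySem.List.enumerate L 0) pvKK true
  have hne : (PySem.List.sorted (PySem.List.enumerate L 0) pvKK true).Pairwise (fun a b => pvKK a ≠ pvKK b) := by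
    have := (hperm.map (fun x => x.1)).nodup_iff.mpr (by
      rw [PySem.List.map_fst_enumerate]
      exact (PySem.List.pairwise_lt_pyRange_one _ _).imp (fun h => ne_of_lt h))
    exact (List.pairwise_map.mp this).imp (fun h hk => h (pv_kk_inj hk))
  exact (hle.and hne).imp (fun ⟨h1, h2⟩ => lt_of_le_of_ne h1 (Ne.symm h2))

lemma pv_dd_map (ss : List (Int × List (String × String))) (seen : PySem.Set String) :
    (pvDD ss seen).map (·.2) = pvDDR (ss.map (·.2)) seen := by
  induction ss generalizing seen with
  | nil => simp [pvDD, pvDDR]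
  | cons p rest ih =>
    simp only [pvDD, List.map_cons, pvDDR]
    by_cases h1 : pvQy p.2 = ""
    · simp [h1, ih]
    · by_cases h2 : pvQy p.2 ∈ seen
      · simp [h1, h2, ih]
      · simp [h1, h2, ih]

lemma pv_dd_sublist (ss : List (Int × List (String × String))) (seen : PySem.Set String) :
    (pvDD ss seen).Sublist ss := by
  induction ss generalizing seen with
  | nil => simp [pvDD]
  | cons p rest ih =>
    simp only [pvDD]
    by_cases h1 : pvQy p.2 = ""
    · simp only [h1, if_true]; exact (ih seen).cons p
    · by_cases h2 : PySem.Set.contains seen (pvQy p.2)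
      · simp only [h1, h2, if_false, if_true]; exact (ih seen).cons p
      · simp only [h1, h2, if_false]; exact (ih _).cons₂ p

lemma pv_mem_dd (ss : List (Int × List (String × String))) (hp : ss.Pairwise (fun a b => pvKK b < pvKK a))
    (seen : PySem.Set String) (x : Int × List (String × String)) :
    x ∈ pvDD ss seen ↔ x ∈ ss ∧ pvQy x.2 ≠ "" ∧ pvQy x.2 ∉ seen ∧ ∀ y ∈ ss, pvQy y.2 = pvQy x.2 → pvKK y ≤ pvKK x := by
  induction ss generalizing seen with
  | nil => simp [pvDD]
  | cons p rest ih =>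
    have hrest : ∀ y ∈ rest, pvKK y < pvKK p := fun y hy => (List.pairwise_cons.mp hp).1 y hy
    have hp' := (List.pairwise_cons.mp hp).2
    have hpnotmem : p ∉ rest := fun hm => lt_irrefl _ (hrest p hm)
    by_cases h1 : pvQy p.2 = ""
    · rw [show pvDD (p :: rest) seen = pvDD rest seen from by simp [pvDD, h1]]
      rw [ih hp' seen]
      constructor
      · rintro ⟨hm, hq, hs, hall⟩
        exact ⟨List.mem_cons_of_mem _ hm, hq, hs, by
          intro y hy hqy
          rcases List.mem_cons.mp hy with rfl | hy'
          · exact absurd (hqy.symm.trans h1) hq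
          · exact hall y hy' hqy⟩
      · rintro ⟨hm, hq, hs, hall⟩
        rcases List.mem_cons.mp hm with rfl | hm'
        · exact absurd h1 hq
        · exact ⟨hm', hq, hs, fun y hy hqy => hall y (List.mem_cons_of_mem _ hy) hqy⟩
    · by_cases h2 : pvQy p.2 ∈ seen
      · have hseen : pvQy p.2 ∈ seen := h2
        rw [show pvDD (p :: rest) seen = pvDD rest seen from by simp [pvDD, h1, h2]]
        rw [ih hp' seen]
        constructor
        · rintro ⟨hm, hq, hs, hall⟩
          refine ⟨List.mem_cons_of_mem _ hm, hq, hs, ?_⟩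
          intro y hy hqy
          rcases List.mem_cons.mp hy with rfl | hy'
          · exact absurd (hqy ▸ hseen) hs
          · exact hall y hy' hqy
        · rintro ⟨hm, hq, hs, hall⟩
          rcases List.mem_cons.mp hm with rfl | hm'
          · exact absurd hseen hs
          · exact ⟨hm', hq, hs, fun y hy hqy => hall y (List.mem_cons_of_mem _ hy) hqy⟩
      · have hseen : pvQy p.2 ∉ seen := h2
        rw [show pvDD (p :: rest) seen = p :: pvDD rest (PySem.Set.add seen (pvQy p.2)) from by simp [pvDD, h1, h2]]
        rw [List.mem_cons, ih hp' _]
        constructor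
        · rintro (rfl | ⟨hm, hq, hs, hall⟩)
          · refine ⟨List.mem_cons_self, h1, hseen, ?_⟩
            intro y hy hqy
            rcases List.mem_cons.mp hy with rfl | hy'
            · exact le_refl _
            · exact le_of_lt (hrest y hy')
          · have hsadd := (PySem.Set.mem_add seen (pvQy p.2) (pvQy x.2)).not.mp hs
            push_neg at hsadd
            refine ⟨List.mem_cons_of_mem _ hm, hq, hsadd.1, ?_⟩
            intro y hy hqy
            rcases List.mem_cons.mp hy with rfl | hy'
            · exact absurd hqy.symm hsadd.2
            · exact hall y hy' hqy
        · rintro ⟨hm, hq, hs, hall⟩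
          rcases List.mem_cons.mp hm with rfl | hm'
          · exact Or.inl rfl
          · right
            have hne : pvQy x.2 ≠ pvQy p.2 := by
              intro he
              have := hall p List.mem_cons_self he.symm
              exact absurd (hrest x hm') (not_lt.mpr this)
            refine ⟨hm', hq, ?_, fun y hy hqy => hall y (List.mem_cons_of_mem _ hy) hqy⟩
            rw [PySem.Set.mem_add]
            rintro (hc | hc)
            · exact hs hc
            · exact hne hc

lemma pv_loopA_lt (mi : Int) : ∀ (ss : List (List (String × String))) (seen : PySem.Set String)
    (merged : List (List (String × String))), (merged.length : Int) < mi →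
    pvLoopA mi ss seen merged = merged ++ (pvDDR ss seen).take (mi - merged.length).toNat := by
  intro ss
  induction ss with
  | nil => intro seen merged h; simp [pvLoopA, pvDDR]
  | cons s rest ih =>
    intro seen merged h
    simp only [pvLoopA, pvDDR]
    by_cases h1 : pvQy s = ""
    · simp only [h1, if_true]
      exact ih seen merged h
    · simp only [h1, if_false]
      by_cases h2 : PySem.Set.contains seen (pvQy s)
      · simp only [h2, if_true]
        exact ih seen merged h
      · simp only [h2, Bool.false_eq_true, if_false]
        by_cases h3 : mi ≤ ((merged ++ [s]).length : Int)
        · simp only [h3, if_true]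
          have hmi : mi - (merged.length : Int) = 1 := by
            simp at h3; omega
          rw [hmi]
          simp
        · simp only [h3, if_false]
          rw [ih _ _ (by simp at h3 ⊢; omega)]
          have h4 : (mi - (merged.length : Int)).toNat = ((mi - ((merged ++ [s]).length : Int)).toNat) + 1 := by
            simp at h3 ⊢; omega
          rw [h4, List.take_succ_cons]
          simp

lemma pv_ddr_all_empty : ∀ (L : List (List (String × String))) (seen : PySem.Set String),
    (∀ r ∈ L, pvQy r = "") → pvDDR L seen = [] := by
  intro L
  induction L with
  | nil => intro seen _; simp [pvDDR]
  | cons r rest ih =>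
    intro seen h
    have h1 : pvQy r = "" := h r (by simp)
    simp only [pvDDR, h1, if_true]
    exact ih seen (fun y hy => h y (List.mem_cons_of_mem _ hy))

lemma pv_bestB_all_empty : ∀ (L : List (List (String × String))) (s : Int)
    (d : PySem.Dict String (Int × List (String × String))),
    (∀ r ∈ L, pvQy r = "") → (PySem.List.enumerate L s).foldl pvBestB d = d := by
  intro L
  induction L with
  | nil => intro s d _; simp [PySem.List.enumerate]
  | cons r rest ih =>
    intro s d h
    rw [PySem.List.enumerate_cons]
    simp only [List.foldl_cons]
    have h1 : pvQy r = "" := h r (by simp)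
    rw [show pvBestB d (s, r) = d from by simp [pvBestB, h1]]
    exact ih (s + 1) d (fun y hy => h y (List.mem_cons_of_mem _ hy))

lemma pv_get?_step (d : PySem.Dict String (Int × List (String × String))) (p : Int × List (String × String))
    (k : String) (hk : k ≠ "") :
    PySem.Dict.get? (pvBestB d p) k = pvStep k (PySem.Dict.get? d k) p := by
  by_cases hq : pvQy p.2 = ""
  · have hne : ¬ (pvQy p.2 = k) := fun h => hk (h.symm.trans hq)
    simp [pvBestB, pvStep, hq, hne]
    intro h
    exact absurd h hk
  · simp only [pvBestB, pvStep, hq, if_false]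
    by_cases hqk : pvQy p.2 = k
    · subst hqk
      cases hg : PySem.Dict.get? d (pvQy p.2) with
      | none => simp [hg, PySem.Dict.get?_insert]
      | some v =>
        simp only [hg, if_true]
        by_cases hlt : pvTs v.2 < pvTs p.2
        · simp [hlt, PySem.Dict.get?_insert]
        · simp [hlt, hg]
    · cases hg : PySem.Dict.get? d (pvQy p.2) with
      | none => simp [hqk, PySem.Dict.get?_insert, Ne.symm hqk]
      | some v =>
        by_cases hlt : pvTs v.2 < pvTs p.2
        · simp [hqk, hlt, PySem.Dict.get?_insert, Ne.symm hqk]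
        · simp [hqk, hlt]

lemma pv_get?_fold (ps : List (Int × List (String × String))) (d : PySem.Dict String (Int × List (String × String)))
    (k : String) (hk : k ≠ "") :
    PySem.Dict.get? (ps.foldl pvBestB d) k = ps.foldl (pvStep k) (PySem.Dict.get? d k) := by
  induction ps generalizing d with
  | nil => rfl
  | cons p ps ih =>
    simp only [List.foldl_cons]
    rw [ih (pvBestB d p), pv_get?_step d p k hk]

lemma pv_items_inv (ps : List (Int × List (String × String))) (d : PySem.Dict String (Int × List (String × String)))
    (hd : ∀ kv ∈ d.items, pvQy kv.2.2 = kv.1 ∧ kv.1 ≠ "") :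
    ∀ kv ∈ (ps.foldl pvBestB d).items, pvQy kv.2.2 = kv.1 ∧ kv.1 ≠ "" := by
  induction ps generalizing d with
  | nil => exact hd
  | cons p ps ih =>
    refine ih (pvBestB d p) ?_
    intro kv hkv
    by_cases hq : pvQy p.2 = ""
    · exact hd kv (by simpa [pvBestB, hq] using hkv)
    · simp only [pvBestB, hq, if_false] at hkv
      cases hg : PySem.Dict.get? d (pvQy p.2) with
      | none =>
        simp only [hg] at hkv
        rcases (PySem.Dict.mem_items_insert _ _ _ _).mp hkv with rfl | ⟨hm, _⟩
        · exact ⟨rfl, hq⟩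
        · exact hd kv hm
      | some v =>
        rw [hg] at hkv
        have hkv' : kv ∈ (if pvTs v.2 < pvTs p.2 then PySem.Dict.insert d (pvQy p.2) p else d).items := hkv
        clear hkv
        by_cases hlt : pvTs v.2 < pvTs p.2
        · rw [if_pos hlt] at hkv'
          rcases (PySem.Dict.mem_items_insert _ _ _ _).mp hkv' with rfl | ⟨hm, _⟩
          · exact ⟨rfl, hq⟩
          · exact hd kv hm
        · rw [if_neg hlt] at hkv'
          exact hd kv hkv'

lemma pv_keys_nodup (ps : List (Int × List (String × String))) (d : PySem.Dict String (Int × List (String × String)))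
    (h : d.keys.Nodup) : (ps.foldl pvBestB d).keys.Nodup := by
  induction ps generalizing d with
  | nil => exact h
  | cons p ps ih =>
    refine ih (pvBestB d p) ?_
    by_cases hq : pvQy p.2 = ""
    · simpa [pvBestB, hq] using h
    · simp only [pvBestB, hq, if_false]
      cases hg : PySem.Dict.get? d (pvQy p.2) with
      | none => exact PySem.Dict.nodup_keys_insert _ _ _ h
      | some v =>
        change (if pvTs v.2 < pvTs p.2 then PySem.Dict.insert d (pvQy p.2) p else d).keys.Nodup
        by_cases hlt : pvTs v.2 < pvTs p.2
        · rw [if_pos hlt]; exact PySem.Dict.nodup_keys_insert _ _ _ h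
        · rw [if_neg hlt]; exact h

lemma pv_F_none_iff (k : String) (ps : List (Int × List (String × String))) (o0 : Option (Int × List (String × String))) :
    ps.foldl (pvStep k) o0 = none ↔ o0 = none ∧ ∀ p ∈ ps, pvQy p.2 ≠ k := by
  induction ps generalizing o0 with
  | nil => simp
  | cons p ps ih =>
    simp only [List.foldl_cons, ih]
    by_cases hq : pvQy p.2 = k
    · have : pvStep k o0 p ≠ none := by
        cases o0 with
        | none => simp [pvStep, hq]
        | some v => by_cases hlt : pvTs v.2 < pvTs p.2 <;> simp [pvStep, hq, hlt]
      constructor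
      · rintro ⟨h1, _⟩; exact absurd h1 this
      · rintro ⟨_, hall⟩; exact absurd hq (hall p (by simp))
    · rw [show pvStep k o0 p = o0 from by simp [pvStep, hq]]
      constructor
      · rintro ⟨h1, hall⟩
        exact ⟨h1, by intro p' hp'; rcases List.mem_cons.mp hp' with rfl | hm; exact hq; exact hall p' hm⟩
      · rintro ⟨h1, hall⟩
        exact ⟨h1, fun p' hp' => hall p' (List.mem_cons_of_mem _ hp')⟩

lemma pv_step_cases (k : String) (o0 : Option (Int × List (String × String))) (p : Int × List (String × String)) :
    pvStep k o0 p = o0 ∨ pvStep k o0 p = some p := by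
  by_cases hq : pvQy p.2 = k
  · cases o0 with
    | none => right; simp [pvStep, hq]
    | some v =>
      by_cases hlt : pvTs v.2 < pvTs p.2
      · right; simp [pvStep, hq, hlt]
      · left; simp [pvStep, hq, hlt]
  · left; simp [pvStep, hq]

lemma pv_F_mem (k : String) (ps : List (Int × List (String × String))) (o0 : Option (Int × List (String × String)))
    (v : Int × List (String × String)) : ps.foldl (pvStep k) o0 = some v → o0 = some v ∨ v ∈ ps := by
  induction ps generalizing o0 with
  | nil => intro h; exact Or.inl h
  | cons p ps ih =>
    intro h
    simp only [List.foldl_cons] at h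
    rcases ih (pvStep k o0 p) h with h1 | h1
    · rcases pv_step_cases k o0 p with h2 | h2
      · exact Or.inl (h2 ▸ h1)
      · right; rw [h2] at h1; simp at h1; simp [h1]
    · exact Or.inr (List.mem_cons_of_mem _ h1)

lemma pv_step_some (k : String) (o0 : Option (Int × List (String × String))) (p w : Int × List (String × String)) :
    pvStep k o0 p = some w → o0 = some w ∨ (pvQy p.2 = k ∧ w = p) := by
  intro h
  by_cases hq : pvQy p.2 = k
  · cases o0 with
    | none => simp [pvStep, hq] at h; exact Or.inr ⟨hq, h.symm⟩
    | some v =>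
      by_cases hlt : pvTs v.2 < pvTs p.2
      · simp [pvStep, hq, hlt] at h; exact Or.inr ⟨hq, h.symm⟩
      · simp [pvStep, hq, hlt] at h; exact Or.inl (by rw [h])
  · simp [pvStep, hq] at h; exact Or.inl (by rw [h])

lemma pv_F_key (k : String) (ps : List (Int × List (String × String))) (o0 : Option (Int × List (String × String)))
    (v : Int × List (String × String)) (h0 : ∀ w, o0 = some w → pvQy w.2 = k) :
    ps.foldl (pvStep k) o0 = some v → pvQy v.2 = k := by
  induction ps generalizing o0 with
  | nil => intro h; exact h0 v h
  | cons p ps ih =>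
    intro h
    simp only [List.foldl_cons] at h
    refine ih (pvStep k o0 p) ?_ h
    intro w hw
    rcases pv_step_some k o0 p w hw with h2 | ⟨hq, rfl⟩
    · exact h0 w h2
    · exact hq

lemma pv_F_max (k : String) (ps : List (Int × List (String × String))) (o0 : Option (Int × List (String × String)))
    (v : Int × List (String × String)) (hps : ps.Pairwise (fun a b => a.1 < b.1))
    (h0 : ∀ w, o0 = some w → ∀ p ∈ ps, w.1 < p.1) :
    ps.foldl (pvStep k) o0 = some v →
      (∀ w, o0 = some w → pvKK w ≤ pvKK v) ∧ ∀ p ∈ ps, pvQy p.2 = k → pvKK p ≤ pvKK v := by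
  induction ps generalizing o0 with
  | nil =>
    intro h
    simp only [List.foldl_nil] at h
    refine ⟨fun w hw => ?_, by simp⟩
    rw [h] at hw
    simp at hw
    rw [hw]
  | cons p ps ih =>
    intro h
    simp only [List.foldl_cons] at h
    have hp1 : ∀ y ∈ ps, p.1 < y.1 := (List.pairwise_cons.mp hps).1
    have hps' := (List.pairwise_cons.mp hps).2
    have h0' : ∀ w, pvStep k o0 p = some w → ∀ r ∈ ps, w.1 < r.1 := by
      intro w hw r hr
      rcases pv_step_cases k o0 p with h2 | h2
      · exact h0 w (h2 ▸ hw) r (List.mem_cons_of_mem _ hr)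
      · rw [h2] at hw; simp at hw; rw [← hw]; exact hp1 r hr
    obtain ⟨C1, C2⟩ := ih (pvStep k o0 p) hps' h0' h
    constructor
    · intro w hw
      have hex : ∃ w1, pvStep k o0 p = some w1 ∧ pvKK w ≤ pvKK w1 := by
        by_cases hq : pvQy p.2 = k
        · rw [hw]
          by_cases hlt : pvTs w.2 < pvTs p.2
          · exact ⟨p, by simp [pvStep, hq, hlt], le_of_lt ((pv_kk_lt_iff w p).mpr (Or.inl hlt))⟩
          · exact ⟨w, by simp [pvStep, hq, hlt], le_refl _⟩
        · exact ⟨w, by rw [show pvStep k o0 p = o0 from by simp [pvStep, hq]]; exact hw, le_refl _⟩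
      obtain ⟨w1, hw1, hle⟩ := hex
      exact le_trans hle (C1 w1 hw1)
    · intro r hr hrk
      rcases List.mem_cons.mp hr with rfl | hm
      · have hstep : ∃ w1, pvStep k o0 r = some w1 ∧ pvKK r ≤ pvKK w1 := by
          cases ho : o0 with
          | none => exact ⟨r, by simp [pvStep, hrk], le_refl _⟩
          | some w =>
            by_cases hlt : pvTs w.2 < pvTs r.2
            · exact ⟨r, by simp [pvStep, hrk, hlt], le_refl _⟩
            · refine ⟨w, by simp [pvStep, hrk, hlt], ?_⟩
              have hwi : w.1 < r.1 := h0 w ho r (by simp)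
              rcases lt_or_eq_of_le (not_lt.mp hlt) with hts | hts
              · exact le_of_lt ((pv_kk_lt_iff r w).mpr (Or.inl hts))
              · exact le_of_lt ((pv_kk_lt_iff r w).mpr (Or.inr ⟨hts, by omega⟩))
        obtain ⟨w1, hw1, hle⟩ := hstep
        exact le_trans hle (C1 w1 hw1)
      · exact C2 r hm hrk

lemma pv_items_empty : ∀ kv ∈ (PySem.Dict.empty : PySem.Dict String (Int × List (String × String))).items, pvQy kv.2.2 = kv.1 ∧ kv.1 ≠ "" := by
  intro kv hkv
  simp [PySem.Dict.empty, PySem.Dict.items] at hkv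

lemma pv_keys_empty_nodup : ((PySem.Dict.empty : PySem.Dict String (Int × List (String × String))).keys).Nodup := by
  simp [PySem.Dict.empty, PySem.Dict.keys]

lemma pv_mem_values_iff (L : List (List (String × String))) (x : Int × List (String × String)) :
    x ∈ ((PySem.List.enumerate L 0).foldl pvBestB PySem.Dict.empty).values ↔ pvWin (PySem.List.enumerate L 0) x := by
  have hinv := pv_items_inv (PySem.List.enumerate L 0) PySem.Dict.empty pv_items_empty
  have hnd := pv_keys_nodup (PySem.List.enumerate L 0) PySem.Dict.empty pv_keys_empty_nodup
  constructor
  · intro hx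
    simp only [PySem.Dict.values, List.mem_map] at hx
    obtain ⟨p0, hm, hy⟩ := hx
    have hm' : (p0.1, x) ∈ ((PySem.List.enumerate L 0).foldl pvBestB PySem.Dict.empty).items := by
      rw [← hy]; exact hm
    obtain ⟨hq0, hk0⟩ := hinv (p0.1, x) hm'
    have hget : ((PySem.List.enumerate L 0).foldl pvBestB PySem.Dict.empty).get? p0.1 = some x :=
      PySem.Dict.get?_of_mem_items _ hm' hnd
    rw [pv_get?_fold _ _ p0.1 hk0, PySem.Dict.get?_empty] at hget
    have hmem : x ∈ PySem.List.enumerate L 0 := by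
      rcases pv_F_mem p0.1 _ none x hget with h | h
      · cases h
      · exact h
    have hmax := (pv_F_max p0.1 _ none x (pv_enum_pairwise L) (by intro w hw; cases hw) hget).2
    refine ⟨hmem, by rw [hq0]; exact hk0, ?_⟩
    intro y hy hqy
    exact hmax y hy (by rw [hqy, hq0])
  · rintro ⟨hmem, hq, hall⟩
    have hget : ((PySem.List.enumerate L 0).foldl pvBestB PySem.Dict.empty).get? (pvQy x.2)
        = (PySem.List.enumerate L 0).foldl (pvStep (pvQy x.2)) none := by
      rw [pv_get?_fold _ _ _ hq, PySem.Dict.get?_empty]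
    cases hv : (PySem.List.enumerate L 0).foldl (pvStep (pvQy x.2)) none with
    | none =>
      exact absurd ((pv_F_none_iff _ _ _).mp hv).2 (by push_neg; exact ⟨x, hmem, rfl⟩)
    | some v =>
      have hvE : v ∈ PySem.List.enumerate L 0 := by
        rcases pv_F_mem _ _ none v hv with h | h
        · cases h
        · exact h
      have hvk : pvQy v.2 = pvQy x.2 := pv_F_key _ _ none v (by intro w hw; cases hw) hv
      have hmax := (pv_F_max _ _ none v (pv_enum_pairwise L) (by intro w hw; cases hw) hv).2
      have hxv : pvKK x ≤ pvKK v := hmax x hmem rfl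
      have hvx : pvKK v ≤ pvKK x := hall v hvE hvk
      have hkk : pvKK v = pvKK x := le_antisymm hvx hxv
      have hveq : v = x := pv_enum_inj L v hvE x hmem (pv_kk_inj hkk)
      subst hveq
      have hg2 : ((PySem.List.enumerate L 0).foldl pvBestB PySem.Dict.empty).get? (pvQy v.2) = some v := by
        rw [hget]; exact hv
      have hmem_items := PySem.Dict.mem_items_of_get?_eq_some _ hg2
      simp only [PySem.Dict.values, List.mem_map]
      exact ⟨(pvQy v.2, v), hmem_items, rfl⟩

lemma pv_values_nodup (L : List (List (String × String))) :
    ((PySem.List.enumerate L 0).foldl pvBestB PySem.Dict.empty).values.Nodup := by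
  have hinv := pv_items_inv (PySem.List.enumerate L 0) PySem.Dict.empty pv_items_empty
  have hnd := pv_keys_nodup (PySem.List.enumerate L 0) PySem.Dict.empty pv_keys_empty_nodup
  have hitems : ((PySem.List.enumerate L 0).foldl pvBestB PySem.Dict.empty).items.Nodup := by
    have h2 : (((PySem.List.enumerate L 0).foldl pvBestB PySem.Dict.empty).items.map (fun p => p.1)).Nodup := hnd
    exact h2.of_map
  refine hitems.map_on ?_
  intro p1 h1 p2 h2 he
  obtain ⟨hq1, _⟩ := hinv p1 h1
  obtain ⟨hq2, _⟩ := hinv p2 h2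
  have hfst : p1.1 = p2.1 := by rw [← hq1, ← hq2, he]
  exact Prod.ext hfst he

lemma pv_S_nodup (L : List (List (String × String))) :
    (PySem.List.sorted (PySem.List.enumerate L 0) pvKK true).Nodup :=
  (pv_S_pairwise L).imp (fun h he => absurd (he ▸ h) (lt_irrefl _))

lemma pv_dd_S_eq_values_sorted (L : List (List (String × String))) :
    PySem.List.sorted (((PySem.List.enumerate L 0).foldl pvBestB PySem.Dict.empty).values) pvKK true
      = pvDD (PySem.List.sorted (PySem.List.enumerate L 0) pvKK true) PySem.Set.empty := by
  refine PySem.List.sorted_rev_eq_of_perm_of_pairwise_gt _ _ pvKK ?_ ?_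
  · refine (List.perm_ext_iff_of_nodup ((pv_dd_sublist _ _).nodup (pv_S_nodup L)) (pv_values_nodup L)).mpr ?_
    intro x
    rw [pv_mem_values_iff L x, pv_mem_dd _ (pv_S_pairwise L) _ x]
    constructor
    · rintro ⟨hm, hq, _, hall⟩
      exact ⟨(PySem.List.mem_sorted _ _ _ _).mp hm, hq,
        fun y hy hqy => hall y ((PySem.List.mem_sorted _ _ _ _).mpr hy) hqy⟩
    · rintro ⟨hm, hq, hall⟩
      refine ⟨(PySem.List.mem_sorted _ _ _ _).mpr hm, hq, by simp [PySem.Set.empty], ?_⟩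
      exact fun y hy hqy => hall y ((PySem.List.mem_sorted _ _ _ _).mp hy) hqy
  · exact (pv_S_pairwise L).sublist (pv_dd_sublist _ _)

-- core identity: B = the first-wins dedup of A's sorted list (no truncation on either side)
lemma pv_core (existing incoming : List (List (String × String))) :
    (PySem.List.sorted2 (((PySem.List.enumerate (existing ++ incoming) 0).foldl pvBestB PySem.Dict.empty).values)
        (fun p => pvTs p.2) (fun p => -p.1) true).map (fun p => p.2)
      = pvDDR (PySem.List.sorted (existing ++ incoming) (fun x => pvTs x) true) PySem.Set.empty := by
  rw [pv_sorted2_eq, pv_dd_S_eq_values_sorted (existing ++ incoming),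
    ← pv_stability (existing ++ incoming), pv_dd_map]

-- ===== VERDICT (by name: the statement is the Claim_ definition above) =====
theorem merge_searches_py_spec : Claim_unchanged_merge_searches_py := by
  intro existing incoming max_items _
  unfold Spec_merge_searches_py
  intro hnd
  unfold merge_searches_py merge_searches_py_alt
  by_cases hm : 1 ≤ max_items
  · rw [pv_loopA_lt max_items _ PySem.Set.empty [] (by simp; omega),
      PySem.List.slice_to _ (by omega : (0 : Int) ≤ max_items)]
    simp only [List.nil_append, List.length_nil, Nat.cast_zero, Int.sub_zero]
    rw [pv_core]
  · have hall : ∀ r ∈ existing ++ incoming, pvQy r = "" := by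
      by_contra hc
      push_neg at hc
      exact hnd ⟨by omega, hc⟩
    have hsorted : ∀ r ∈ PySem.List.sorted (existing ++ incoming) (fun x => pvTs x) true, pvQy r = "" :=
      fun r hr => hall r ((PySem.List.mem_sorted _ _ _ _).mp hr)
    have hA : pvLoopA max_items (PySem.List.sorted (existing ++ incoming) (fun x => pvTs x) true) PySem.Set.empty [] = [] := by
      have := pv_ddr_all_empty _ PySem.Set.empty hsorted
      generalize hS : PySem.List.sorted (existing ++ incoming) (fun x => pvTs x) true = S at *
      clear hS
      induction S with
      | nil => simp [pvLoopA]
      | cons s rest ih =>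
        have h1 : pvQy s = "" := hsorted s (by simp)
        simp only [pvLoopA, h1, if_true]
        exact ih (fun r hr => hsorted r (List.mem_cons_of_mem _ hr)) (by
          simpa [pvDDR, h1] using this)
    rw [hA, pv_bestB_all_empty _ 0 _ hall]
    simp [PySem.Dict.empty, PySem.Dict.values, PySem.Dict.items, PySem.List.sorted2, PySem.List.slice]

theorem merge_searches_py_changed : Claim_changed_merge_searches_py := by
  unfold Claim_changed_merge_searches_py
  decide
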